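-- pv_equiv track=rewrite | github.com/XucroYuri/LocalVideo | backend/app/providers/deep_research/tavily.py | _phase_from_event_name
-- ===== SOURCE A (Python) =====
-- def _phase_from_event_name(event_name: str | None) -> str | None:
--     if not event_name:
--         return None
--     name = event_name.strip().lower()
--     if any(token in name for token in ("plan", "planning")):
--         return "planning"
--     if any(token in name for token in ("search", "crawl", "retriev", "subtopic")):
--         return "searching"
--     if any(token in name for token in ("generate", "write", "synth")):
--         return "generating"
--     if any(token in name for token in ("final", "done", "complete")):
--         return "finalizing"
--     return None
-- ===== SOURCE B (Python) =====
-- # Different algorithm: one position scan over the name matching all keywords at each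
-- # offset into a set of hit phases, then a priority pass picks the first phase by rank.
-- _RULES = (
--     ("plan", "planning"),
--     ("search", "searching"), ("crawl", "searching"),
--     ("retriev", "searching"), ("subtopic", "searching"),
--     ("generate", "generating"), ("write", "generating"), ("synth", "generating"),
--     ("final", "finalizing"), ("done", "finalizing"), ("complete", "finalizing"),
-- )
-- _PRIORITY = ("planning", "searching", "generating", "finalizing")
--
--
-- def _phase_from_event_name(event_name):
--     if not event_name:
--         return None
--     name = event_name.strip().lower()
--     hits = set()
--     for i in range(len(name)):
--         for tok, phase in _RULES:
--             if name.startswith(tok, i):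
--                 hits.add(phase)
--     for phase in _PRIORITY:
--         if phase in hits:
--             return phase
--     return None
-- ===== Notes on version B (the rewrite author's own statement) =====
-- stated objective: alternative
-- what changed: Replaces A's four ordered any(token in name) branches by a multi-keyword position scan: a single sweep over the name's offsets tests every keyword with startswith and accumulates the set of matched phases, then a separate priority pass returns the highest-ranked matched phase ('planning' is dropped since 'plan' subsumes it).
import Mathlib
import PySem

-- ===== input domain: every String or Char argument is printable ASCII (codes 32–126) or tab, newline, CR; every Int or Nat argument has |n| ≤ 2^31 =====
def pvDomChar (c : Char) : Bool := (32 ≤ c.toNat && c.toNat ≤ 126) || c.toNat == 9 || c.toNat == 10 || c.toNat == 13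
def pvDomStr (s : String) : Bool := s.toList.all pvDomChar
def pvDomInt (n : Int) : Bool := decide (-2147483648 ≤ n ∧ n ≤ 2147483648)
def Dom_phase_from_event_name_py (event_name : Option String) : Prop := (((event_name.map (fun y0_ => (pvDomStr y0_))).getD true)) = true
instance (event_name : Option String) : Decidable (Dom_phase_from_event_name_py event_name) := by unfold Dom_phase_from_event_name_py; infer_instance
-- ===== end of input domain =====

-- B replaces A's four ordered any(token in name) branches by a multi-keyword position scan
-- collecting the set of matched phases, then a priority pass; alternative algorithm, same cost.


-- ===== PORT A =====
def phase_from_event_name_py (event_name : Option String) : Option String :=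
  match event_name with
  | none => none
  | some s =>
    if s = "" then none
    else
      let name := PySem.Str.lower (PySem.Str.strip s)
      if ["plan", "planning"].any (fun token => PySem.Str.isIn token name) then some "planning"
      else if ["search", "crawl", "retriev", "subtopic"].any (fun token => PySem.Str.isIn token name) then some "searching"
      else if ["generate", "write", "synth"].any (fun token => PySem.Str.isIn token name) then some "generating"
      else if ["final", "done", "complete"].any (fun token => PySem.Str.isIn token name) then some "finalizing"
      else none

-- ===== PORT B =====
def pvRules : List (String × String) :=
  [("plan", "planning"),
   ("search", "searching"), ("crawl", "searching"), ("retriev", "searching"), ("subtopic", "searching"),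
   ("generate", "generating"), ("write", "generating"), ("synth", "generating"),
   ("final", "finalizing"), ("done", "finalizing"), ("complete", "finalizing")]

def pvPriority : List String := ["planning", "searching", "generating", "finalizing"]

-- Source B's 'name.startswith(tok, i)' (0 ≤ i) is ported exactly as: tok.toList is a prefix of name.toList.drop i
def phase_from_event_name_py_alt (event_name : Option String) : Option String :=
  match event_name with
  | none => none
  | some s =>
    if s = "" then none
    else
      let name := PySem.Str.lower (PySem.Str.strip s)
      let hits : PySem.Set String :=
        (List.range name.toList.length).foldl (fun acc i =>
          pvRules.foldl (fun acc p =>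
            if PySem.Chars.startswith (name.toList.drop i) p.1.toList then PySem.Set.add acc p.2
            else acc) acc)
          PySem.Set.empty
      pvPriority.find? (fun ph => PySem.Set.contains hits ph)

-- ===== PRECONDITION & SPEC =====
def Spec_phase_from_event_name_py (event_name : Option String) (out : Option String) : Prop := out = phase_from_event_name_py_alt event_name
instance (event_name : Option String) (out : Option String) : Decidable (Spec_phase_from_event_name_py event_name out) := by unfold Spec_phase_from_event_name_py; infer_instance

-- ===== CLAIM (what is proved, stated in full; the proofs are below) =====
def Claim_equal_phase_from_event_name_py : Prop := ∀ (event_name : Option String), Dom_phase_from_event_name_py event_name → Spec_phase_from_event_name_py event_name (phase_from_event_name_py event_name)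

-- ===== LEMMAS AND PROOFS =====

-- membership after the inner fold over the rule table
theorem pv_fold_mem (rs : List (String × String)) (c : String × String → Bool) (acc : PySem.Set String) (ph : String) :
    (ph ∈ rs.foldl (fun acc p => if c p then PySem.Set.add acc p.2 else acc) acc)
    ↔ ph ∈ acc ∨ ∃ p ∈ rs, p.2 = ph ∧ c p = true := by
  induction rs generalizing acc with
  | nil => simp
  | cons a l ih =>
    simp only [List.foldl_cons]
    cases ha : c a with
    | true =>
      rw [if_pos rfl, ih]
      simp only [PySem.Set.mem_add, List.mem_cons]
      constructor
      · rintro (⟨h | h⟩ | ⟨p, hp, h2, hc⟩)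
        · exact Or.inl h
        · exact Or.inr ⟨a, Or.inl rfl, h.symm, ha⟩
        · exact Or.inr ⟨p, Or.inr hp, h2, hc⟩
      · rintro (h | ⟨p, rfl | hp, h2, hc⟩)
        · exact Or.inl (Or.inl h)
        · exact Or.inl (Or.inr h2.symm)
        · exact Or.inr ⟨p, hp, h2, hc⟩
    | false =>
      rw [if_neg (by simp), ih]
      simp only [List.mem_cons]
      constructor
      · rintro (h | ⟨p, hp, h2, hc⟩)
        · exact Or.inl h
        · exact Or.inr ⟨p, Or.inr hp, h2, hc⟩
      · rintro (h | ⟨p, rfl | hp, h2, hc⟩)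
        · exact Or.inl h
        · exact absurd hc (by simp [ha])
        · exact Or.inr ⟨p, hp, h2, hc⟩

-- membership after the outer fold over the positions
theorem pv_hits_mem (cs : List Char) (idxs : List Nat) (acc : PySem.Set String) (ph : String) :
    (ph ∈ idxs.foldl (fun acc i =>
        pvRules.foldl (fun acc p =>
          if PySem.Chars.startswith (cs.drop i) p.1.toList then PySem.Set.add acc p.2 else acc) acc) acc)
    ↔ ph ∈ acc ∨ ∃ i ∈ idxs, ∃ p ∈ pvRules, p.2 = ph ∧ PySem.Chars.startswith (cs.drop i) p.1.toList = true := by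
  induction idxs generalizing acc with
  | nil => simp
  | cons j l ih =>
    simp only [List.foldl_cons]
    rw [ih, pv_fold_mem]
    simp only [List.mem_cons]
    constructor
    · rintro (⟨h | ⟨p, hp, h2, hc⟩⟩ | ⟨i, hi, p, hp, h2, hc⟩)
      · exact Or.inl h
      · exact Or.inr ⟨j, Or.inl rfl, p, hp, h2, hc⟩
      · exact Or.inr ⟨i, Or.inr hi, p, hp, h2, hc⟩
    · rintro (h | ⟨i, rfl | hi, p, hp, h2, hc⟩)
      · exact Or.inl (Or.inl h)
      · exact Or.inl (Or.inr ⟨p, hp, h2, hc⟩)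
      · exact Or.inr ⟨i, hi, p, hp, h2, hc⟩

-- a nonempty token is a prefix at some scanned offset iff it is a substring
theorem pv_pos_iff_isIn (cs : List Char) (tok : List Char) (htok : tok ≠ []) :
    (∃ i ∈ List.range cs.length, PySem.Chars.startswith (cs.drop i) tok = true)
    ↔ PySem.Chars.isIn tok cs = true := by
  rw [← PySem.Chars.exists_prefix_drop_iff_isIn]
  constructor
  · rintro ⟨i, _, h⟩
    exact ⟨i, (PySem.Chars.startswith_iff _ _).mp h⟩
  · rintro ⟨j, hj⟩
    by_cases hlt : j < cs.length
    · exact ⟨j, List.mem_range.mpr hlt, (PySem.Chars.startswith_iff _ _).mpr hj⟩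
    · exfalso
      rw [List.drop_eq_nil_of_le (le_of_not_gt hlt), List.prefix_nil] at hj
      exact htok hj

-- no rule token is empty
theorem pv_rules_tok_ne_nil : ∀ p ∈ pvRules, p.1.toList ≠ [] := by decide

-- the hit set contains a phase iff one of its rule tokens occurs in the name
theorem pv_contains_hits (cs : List Char) (ph : String) :
    PySem.Set.contains
      ((List.range cs.length).foldl (fun acc i =>
          pvRules.foldl (fun acc p =>
            if PySem.Chars.startswith (cs.drop i) p.1.toList then PySem.Set.add acc p.2 else acc) acc)
        PySem.Set.empty) ph = true
    ↔ ∃ p ∈ pvRules, p.2 = ph ∧ PySem.Chars.isIn p.1.toList cs = true := by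
  rw [PySem.Set.contains_iff]
  rw [pv_hits_mem]
  constructor
  · rintro (h | ⟨i, hi, p, hp, h2, hc⟩)
    · exact absurd h (by simp [PySem.Set.empty])
    · exact ⟨p, hp, h2, (pv_pos_iff_isIn cs p.1.toList (pv_rules_tok_ne_nil p hp)).mp ⟨i, hi, hc⟩⟩
  · rintro ⟨p, hp, h2, hc⟩
    obtain ⟨i, hi, h⟩ := (pv_pos_iff_isIn cs p.1.toList (pv_rules_tok_ne_nil p hp)).mpr hc
    exact Or.inr ⟨i, hi, p, hp, h2, h⟩

-- the longer first-branch token is subsumed by the shorter one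
theorem pv_planning_imp_plan (name : String) :
    PySem.Str.isIn "planning" name = true → PySem.Str.isIn "plan" name = true := by
  intro h
  rw [PySem.Str.isIn_iff_infix] at h ⊢
  exact List.IsInfix.trans (List.IsPrefix.isInfix (by decide)) h

-- ===== VERDICT (by name: the statement is the Claim_ definition above) =====
set_option maxHeartbeats 1000000 in
theorem phase_from_event_name_py_spec : Claim_equal_phase_from_event_name_py := by
  intro event_name _
  unfold Spec_phase_from_event_name_py
  cases event_name with
  | none => rfl
  | some s =>
    simp only [phase_from_event_name_py, phase_from_event_name_py_alt]
    by_cases hs : s = ""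
    · simp [hs]
    · rw [if_neg hs, if_neg hs]
      set name := PySem.Str.lower (PySem.Str.strip s) with hname
      set hits := (List.range name.toList.length).foldl (fun acc i =>
          pvRules.foldl (fun acc p =>
            if PySem.Chars.startswith (name.toList.drop i) p.1.toList then PySem.Set.add acc p.2 else acc) acc)
        PySem.Set.empty with hhits
      have key : ∀ ph, PySem.Set.contains hits ph = true
          ↔ ∃ p ∈ pvRules, p.2 = ph ∧ PySem.Str.isIn p.1 name = true := by
        intro ph
        rw [hhits, pv_contains_hits name.toList ph]
        constructor
        · rintro ⟨p, hp, h2, hc⟩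
          exact ⟨p, hp, h2, by rw [PySem.Str.isIn_iff_infix, ← PySem.Chars.isIn_iff_infix]; exact hc⟩
        · rintro ⟨p, hp, h2, hc⟩
          exact ⟨p, hp, h2, by rw [PySem.Chars.isIn_iff_infix, ← PySem.Str.isIn_iff_infix]; exact hc⟩
      have h1 : PySem.Set.contains hits "planning"
          = ["plan", "planning"].any (fun token => PySem.Str.isIn token name) := by
        by_cases hb : ["plan", "planning"].any (fun token => PySem.Str.isIn token name) = true
        · rw [hb, key]
          have hp : PySem.Str.isIn "plan" name = true := by
            simp only [List.any_cons, List.any_nil, Bool.or_false, Bool.or_eq_true] at hb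
            exact hb.elim id (pv_planning_imp_plan name)
          exact ⟨("plan", "planning"), by simp [pvRules], rfl, hp⟩
        · rw [Bool.eq_false_iff.mpr hb, ← Bool.not_eq_true, key]
          rintro ⟨p, hp, h2, hc⟩
          apply hb
          have hpl : ∀ q ∈ pvRules, q.2 = "planning" → q = ("plan", "planning") := by decide
          rw [hpl p hp h2] at hc
          exact List.any_eq_true.mpr ⟨"plan", by simp, hc⟩
      have hseg : ∀ (ph : String) (toks : List String),
          (∀ p ∈ pvRules, p.2 = ph → p.1 ∈ toks) →
          (∀ t ∈ toks, (t, ph) ∈ pvRules) →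
          PySem.Set.contains hits ph = toks.any (fun token => PySem.Str.isIn token name) := by
        intro ph toks hall hmem
        by_cases hb : toks.any (fun token => PySem.Str.isIn token name) = true
        · rw [hb, key]
          obtain ⟨t, ht, hc⟩ := List.any_eq_true.mp hb
          exact ⟨(t, ph), hmem t ht, rfl, hc⟩
        · rw [Bool.eq_false_iff.mpr hb, ← Bool.not_eq_true, key]
          rintro ⟨p, hp, h2, hc⟩
          exact hb (List.any_eq_true.mpr ⟨p.1, hall p hp h2, hc⟩)
      have h2 : PySem.Set.contains hits "searching"
          = ["search", "crawl", "retriev", "subtopic"].any (fun token => PySem.Str.isIn token name) :=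
        hseg "searching" _ (by decide) (by decide)
      have h3 : PySem.Set.contains hits "generating"
          = ["generate", "write", "synth"].any (fun token => PySem.Str.isIn token name) :=
        hseg "generating" _ (by decide) (by decide)
      have h4 : PySem.Set.contains hits "finalizing"
          = ["final", "done", "complete"].any (fun token => PySem.Str.isIn token name) :=
        hseg "finalizing" _ (by decide) (by decide)
      show _ = pvPriority.find? (fun ph => PySem.Set.contains hits ph)
      simp only [pvPriority]
      by_cases b1 : ["plan", "planning"].any (fun token => PySem.Str.isIn token name) = true
      · rw [if_pos b1, List.find?_cons_of_pos (show PySem.Set.contains hits "planning" = true by rw [h1]; exact b1)]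
      · rw [if_neg b1, List.find?_cons_of_neg (show ¬ PySem.Set.contains hits "planning" = true by rw [h1]; exact b1)]
        by_cases b2 : ["search", "crawl", "retriev", "subtopic"].any (fun token => PySem.Str.isIn token name) = true
        · rw [if_pos b2, List.find?_cons_of_pos (show PySem.Set.contains hits "searching" = true by rw [h2]; exact b2)]
        · rw [if_neg b2, List.find?_cons_of_neg (show ¬ PySem.Set.contains hits "searching" = true by rw [h2]; exact b2)]
          by_cases b3 : ["generate", "write", "synth"].any (fun token => PySem.Str.isIn token name) = true
          · rw [if_pos b3, List.find?_cons_of_pos (show PySem.Set.contains hits "generating" = true by rw [h3]; exact b3)]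
          · rw [if_neg b3, List.find?_cons_of_neg (show ¬ PySem.Set.contains hits "generating" = true by rw [h3]; exact b3)]
            by_cases b4 : ["final", "done", "complete"].any (fun token => PySem.Str.isIn token name) = true
            · rw [if_pos b4, List.find?_cons_of_pos (show PySem.Set.contains hits "finalizing" = true by rw [h4]; exact b4)]
            · rw [if_neg b4, List.find?_cons_of_neg (show ¬ PySem.Set.contains hits "finalizing" = true by rw [h4]; exact b4)]
              rfl
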